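-- pv_equiv track=rewrite | github.com/rafibz007/AlgorithmsAndDataStructures | All-Unorganised/Exercises/Cw8/zad 1 kolos.py | to_port
-- ===== SOURCE A (Python) =====
-- from collections import deque
--
-- def to_port( M, T ):
--     n = len(M)
--     visited = [ [False]*n for _ in range(n) ]
--     Q = deque()
--
--     Q.append( (0, 0) )
--     visited[0][0] = True
--
--     neighbours = [ [-1,0], [0,-1], [1,0], [0,1] ]
--
--     while Q:
--         u = Q.popleft()
--         for ngh in neighbours:
--             if not 0 <= u[0]+ngh[0] < n or not 0 <= u[1]+ngh[1] < n: continue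
--             if not visited[ u[0]+ngh[0] ][ u[1]+ngh[1] ] and M[ u[0]+ngh[0] ][ u[1]+ngh[1] ]>T:
--                 visited[u[0] + ngh[0]][u[1] + ngh[1]] = True
--                 Q.append( (u[0] + ngh[0], u[1] + ngh[1]) )
--
--
--     return visited[n-1][n-1]
-- ===== SOURCE B (Python) =====
-- # Round-based fixed-point flood fill instead of a BFS queue: repeatedly expand the
-- # visited grid by one whole-grid sweep until it stops changing (alternative algorithm,
-- # not faster). Corner-reachability is the same closure, so the returned boolean matches.
-- def to_port(M, T):
--     n = len(M)
--     vis = [[False] * n for _ in range(n)]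
--     vis[0][0] = True
--     for _ in range(n * n):
--         new = [[vis[i][j] or (M[i][j] > T and any(
--                     0 <= i + di < n and 0 <= j + dj < n and vis[i + di][j + dj]
--                     for di, dj in ((-1, 0), (0, -1), (1, 0), (0, 1))))
--                 for j in range(n)]
--                for i in range(n)]
--         if new == vis:
--             break
--         vis = new
--     return vis[n - 1][n - 1]
-- ===== Notes on version B (the rewrite author's own statement) =====
-- stated objective: alternative
-- what changed: Replaced the deque-based BFS (pop a cell, mark and enqueue its unvisited above-threshold neighbours) by round-based fixed-point iteration: repeatedly recompute the whole visited grid in one sweep (cell visited if it was, or is above threshold with a visited neighbour) until it stops changing, then read the corner.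
-- outside the precondition, e.g. on to_port([[-1, -1], [-1]], 0): A returns False, B raises IndexError
import Mathlib
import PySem

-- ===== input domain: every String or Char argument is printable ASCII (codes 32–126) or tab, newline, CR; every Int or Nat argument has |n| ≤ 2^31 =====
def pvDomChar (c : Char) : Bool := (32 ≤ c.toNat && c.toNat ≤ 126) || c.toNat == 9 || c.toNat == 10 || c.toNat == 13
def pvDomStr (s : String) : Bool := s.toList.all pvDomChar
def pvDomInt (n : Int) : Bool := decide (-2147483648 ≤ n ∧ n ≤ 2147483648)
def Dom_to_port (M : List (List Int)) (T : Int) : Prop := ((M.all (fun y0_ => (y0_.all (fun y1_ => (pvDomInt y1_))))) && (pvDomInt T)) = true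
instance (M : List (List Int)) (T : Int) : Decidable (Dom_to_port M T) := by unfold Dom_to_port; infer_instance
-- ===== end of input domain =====

-- B replaces the deque-based BFS by round-based fixed-point iteration over the whole
-- visited grid (alternative algorithm, not claimed faster); return values proved equal.


-- ===== PORT A =====
-- Shared grid primitives. Python reads/writes `xs[i][j]` only under guards that give
-- 0 ≤ i,j < n (with row length ≥ n from Pre_), so `Int.toNat` + `getD` is exact there.
def pvNeighbours : List (Int × Int) := [(-1, 0), (0, -1), (1, 0), (0, 1)]

def pvGetB (vis : List (List Bool)) (i j : Int) : Bool :=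
  (vis.getD i.toNat []).getD j.toNat false

def pvGetI (M : List (List Int)) (i j : Int) : Int :=
  (M.getD i.toNat []).getD j.toNat 0

def pvSet (vis : List (List Bool)) (i j : Int) : List (List Bool) :=
  vis.set i.toNat ((vis.getD i.toNat []).set j.toNat true)

-- the body of A's `for ngh in neighbours` loop
def pvStep (M : List (List Int)) (T n : Int) (u : Int × Int)
    (st : List (List Bool) × List (Int × Int)) (d : Int × Int) :
    List (List Bool) × List (Int × Int) :=
  if ¬(0 ≤ u.1 + d.1 ∧ u.1 + d.1 < n ∧ 0 ≤ u.2 + d.2 ∧ u.2 + d.2 < n) then st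
  else if pvGetB st.1 (u.1 + d.1) (u.2 + d.2) = false ∧ pvGetI M (u.1 + d.1) (u.2 + d.2) > T then
    (pvSet st.1 (u.1 + d.1) (u.2 + d.2), st.2 ++ [(u.1 + d.1, u.2 + d.2)])
  else st

-- A's `while Q` loop; fuel n*n (each pop after the first is paid for by a fresh mark,
-- so n*n iterations always drain the queue — proved in pvBfsA_loop below).
def pvBfs (M : List (List Int)) (T n : Int) :
    Nat → List (List Bool) → List (Int × Int) → List (List Bool)
  | _, vis, [] => vis
  | 0, vis, _ :: _ => vis
  | fuel + 1, vis, u :: Qt =>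
      let r := pvNeighbours.foldl (pvStep M T n u) (vis, [])
      pvBfs M T n fuel r.1 (Qt ++ r.2)

def to_port (M : List (List Int)) (T : Int) : Bool :=
  let n := M.length
  let vis := pvSet (List.replicate n (List.replicate n false)) 0 0
  let fin := pvBfs M T (n : Int) (n * n) vis [(0, 0)]
  pvGetB fin ((n : Int) - 1) ((n : Int) - 1)

-- ===== PORT B =====
-- one whole-grid sweep: `new[i][j] = vis[i][j] or (M[i][j] > T and any visited neighbour)`
def pvExpand (M : List (List Int)) (T : Int) (n : Nat) (vis : List (List Bool)) :
    List (List Bool) :=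
  (List.range n).map (fun (i : Nat) => (List.range n).map (fun (j : Nat) =>
    pvGetB vis (i : Int) (j : Int) ||
      (decide (pvGetI M (i : Int) (j : Int) > T) &&
        pvNeighbours.any (fun d =>
          decide (0 ≤ (i : Int) + d.1 ∧ (i : Int) + d.1 < (n : Int) ∧
                  0 ≤ (j : Int) + d.2 ∧ (j : Int) + d.2 < (n : Int)) &&
          pvGetB vis ((i : Int) + d.1) ((j : Int) + d.2)))))

-- B's `for _ in range(n*n)` loop with the `if new == vis: break`
def pvSweep (M : List (List Int)) (T : Int) (n : Nat) :
    Nat → List (List Bool) → List (List Bool)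
  | 0, vis => vis
  | k + 1, vis =>
      let new := pvExpand M T n vis
      if new = vis then vis else pvSweep M T n k new

def to_port_alt (M : List (List Int)) (T : Int) : Bool :=
  let n := M.length
  let vis := pvSet (List.replicate n (List.replicate n false)) 0 0
  let fin := pvSweep M T n (n * n) vis
  pvGetB fin ((n : Int) - 1) ((n : Int) - 1)

-- ===== PRECONDITION & SPEC =====
-- Pre_ keeps the natural domain: a nonempty grid whose rows (unless it is 1×1, where
-- neither program reads M at all) have at least len(M) entries; A raises IndexError on
-- the empty matrix and can raise on ragged shorter rows, and when a ragged input happens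
-- to return, that is an accident of which cells the BFS touches.
def Pre_to_port (M : List (List Int)) (T : Int) : Prop :=
  M ≠ [] ∧ (M.length = 1 ∨ ∀ row ∈ M, M.length ≤ row.length)
instance (M : List (List Int)) (T : Int) : Decidable (Pre_to_port M T) := by
  unfold Pre_to_port; infer_instance

def pvWitness_to_port : List (List Int) × Int := ([[1, 1], [0, 1]], 0)

def Spec_to_port (M : List (List Int)) (T : Int) (out : Bool) : Prop := out = to_port_alt M T
instance (M : List (List Int)) (T : Int) (out : Bool) : Decidable (Spec_to_port M T out) := by
  unfold Spec_to_port; infer_instance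

-- ===== CLAIM (what is proved, stated in full; the proofs are below) =====
def Claim_equal_to_port : Prop := ∀ (M : List (List Int)) (T : Int), Dom_to_port M T → Pre_to_port M T → Spec_to_port M T (to_port M T)

-- ===== LEMMAS AND PROOFS =====

-- proof-side vocabulary
def pvInR (n : Nat) (p : Int × Int) : Prop :=
  0 ≤ p.1 ∧ p.1 < (n : Int) ∧ 0 ≤ p.2 ∧ p.2 < (n : Int)

def pvStp (M : List (List Int)) (T : Int) (n : Nat) (p q : Int × Int) : Prop :=
  pvInR n q ∧ pvGetI M q.1 q.2 > T ∧ ∃ d ∈ pvNeighbours, q = (p.1 + d.1, p.2 + d.2)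

def pvRch (M : List (List Int)) (T : Int) (n : Nat) (p : Int × Int) : Prop :=
  Relation.ReflTransGen (pvStp M T n) (0, 0) p

def pvShp (n : Nat) (vis : List (List Bool)) : Prop :=
  vis.length = n ∧ ∀ row ∈ vis, row.length = n

def pvFls (n : Nat) (vis : List (List Bool)) : Finset (Fin n × Fin n) :=
  Finset.univ.filter (fun p => pvGetB vis (p.1.val : Int) (p.2.val : Int) = false)

theorem pvGetB_set {n : Nat} {vis : List (List Bool)} (h : pvShp n vis)
    {p : Int × Int} (hp : pvInR n p) (q : Int × Int) (hq : pvInR n q) :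
    pvGetB (pvSet vis p.1 p.2) q.1 q.2 = (decide (q = p) || pvGetB vis q.1 q.2) := by
  obtain ⟨hp1, hp2, hp3, hp4⟩ := hp
  obtain ⟨hq1, hq2, hq3, hq4⟩ := hq
  have hlen := h.1
  have hi : p.1.toNat < vis.length := by omega
  have hqp : (q = p) ↔ (p.1.toNat = q.1.toNat ∧ p.2.toNat = q.2.toNat) := by
    rw [Prod.ext_iff]
    constructor
    · rintro ⟨h1, h2⟩; constructor <;> omega
    · rintro ⟨h1, h2⟩; exact ⟨by omega, by omega⟩
  have hrow : vis[p.1.toNat]?.getD [] = vis[p.1.toNat]'hi := by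
    rw [List.getElem?_eq_getElem hi, Option.getD_some]
  have hrlen : (vis[p.1.toNat]'hi).length = n := h.2 _ (List.getElem_mem hi)
  unfold pvSet pvGetB
  simp only [List.getD_eq_getElem?_getD]
  rw [List.getElem?_set]
  by_cases ha : p.1.toNat = q.1.toNat
  · rw [if_pos ha, if_pos hi, Option.getD_some, hrow, List.getElem?_set]
    by_cases hb : p.2.toNat = q.2.toNat
    · rw [if_pos hb, if_pos (by omega), Option.getD_some]
      have : q = p := hqp.mpr ⟨ha, hb⟩
      simp [this]
    · rw [if_neg hb]
      have : ¬ (q = p) := fun hc => hb (hqp.mp hc).2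
      simp only [this, decide_false, Bool.false_or]
      rw [← ha, hrow]
  · rw [if_neg ha]
    have : ¬ (q = p) := fun hc => ha (hqp.mp hc).1
    simp only [this, decide_false, Bool.false_or]

theorem pvGetB_set' {n : Nat} {vis : List (List Bool)} (h : pvShp n vis)
    {x y : Int} (hx0 : 0 ≤ x) (hx : x < (n : Int)) (hy0 : 0 ≤ y) (hy : y < (n : Int))
    (a b : Int) (ha0 : 0 ≤ a) (ha : a < (n : Int)) (hb0 : 0 ≤ b) (hb : b < (n : Int)) :
    pvGetB (pvSet vis x y) a b = ((decide (a = x) && decide (b = y)) || pvGetB vis a b) := by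
  have := pvGetB_set h (p := (x, y)) ⟨hx0, hx, hy0, hy⟩ (a, b) ⟨ha0, ha, hb0, hb⟩
  simp only [Prod.mk.injEq] at this
  rw [this]
  congr 1
  rw [Bool.decide_and]

theorem pvShp_set {n : Nat} {vis : List (List Bool)} (h : pvShp n vis)
    {i : Int} (j : Int) (hi0 : 0 ≤ i) (hilt : i < (n : Int)) : pvShp n (pvSet vis i j) := by
  have hlen := h.1
  have hi : i.toNat < vis.length := by omega
  refine ⟨by rw [pvSet, List.length_set]; exact h.1, ?_⟩
  intro row hrow
  rw [pvSet] at hrow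
  rcases List.mem_or_eq_of_mem_set hrow with hmem | heq
  · exact h.2 _ hmem
  · subst heq
    rw [List.length_set, List.getD_eq_getElem?_getD, List.getElem?_eq_getElem hi,
      Option.getD_some]
    exact h.2 _ (List.getElem_mem hi)

theorem pvFls_card_set {n : Nat} {vis : List (List Bool)} (h : pvShp n vis)
    {p : Int × Int} (hp : pvInR n p) (hf : pvGetB vis p.1 p.2 = false) :
    (pvFls n (pvSet vis p.1 p.2)).card + 1 = (pvFls n vis).card := by
  obtain ⟨hp1, hp2, hp3, hp4⟩ := hp
  have hfin1 : p.1.toNat < n := by omega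
  have hfin2 : p.2.toNat < n := by omega
  have hmem : ((⟨p.1.toNat, hfin1⟩, ⟨p.2.toNat, hfin2⟩) : Fin n × Fin n) ∈ pvFls n vis := by
    simp only [pvFls, Finset.mem_filter, Finset.mem_univ, true_and]
    have e1 : ((p.1.toNat : Nat) : Int) = p.1 := by omega
    have e2 : ((p.2.toNat : Nat) : Int) = p.2 := by omega
    rw [show ((⟨p.1.toNat, hfin1⟩ : Fin n).val : Int) = p.1 from e1,
      show ((⟨p.2.toNat, hfin2⟩ : Fin n).val : Int) = p.2 from e2]
    exact hf
  have hset : pvFls n (pvSet vis p.1 p.2) =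
      (pvFls n vis).erase (⟨p.1.toNat, hfin1⟩, ⟨p.2.toNat, hfin2⟩) := by
    ext q
    simp only [pvFls, Finset.mem_filter, Finset.mem_univ, true_and, Finset.mem_erase, ne_eq,
      Prod.ext_iff, Fin.ext_iff]
    rw [pvGetB_set' h hp1 hp2 hp3 hp4 ((q.1.val : Nat) : Int) ((q.2.val : Nat) : Int)
      (Int.natCast_nonneg _) (by exact_mod_cast q.1.isLt) (Int.natCast_nonneg _)
      (by exact_mod_cast q.2.isLt)]
    simp only [Bool.or_eq_false_iff, Bool.and_eq_false_iff, decide_eq_false_iff_not]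
    exact and_congr (by omega) Iff.rfl
  rw [hset, Finset.card_erase_add_one hmem]

theorem pvRch_inR {M : List (List Int)} {T : Int} {n : Nat} (hn : 0 < n)
    {p : Int × Int} (h : pvRch M T n p) : pvInR n p := by
  induction h with
  | refl =>
    refine ⟨le_refl 0, ?_, le_refl 0, ?_⟩ <;> · show (0:Int) < (n:Int); exact_mod_cast hn
  | tail _ hstep _ => exact hstep.1

theorem pvNeighbours_neg {d : Int × Int} (hd : d ∈ pvNeighbours) :
    (-d.1, -d.2) ∈ pvNeighbours := by
  simp only [pvNeighbours, List.mem_cons, List.not_mem_nil, or_false] at hd ⊢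
  rcases hd with h | h | h | h <;> subst h <;> norm_num

-- the heart of the A side: one pass of the neighbour fold
set_option maxHeartbeats 1000000 in
theorem pvFold_step (M : List (List Int)) (T : Int) (n : Nat) (u : Int × Int) :
    ∀ (ds : List (Int × Int)), (∀ d ∈ ds, d ∈ pvNeighbours) →
    ∀ (vis : List (List Bool)) (acc : List (Int × Int)), pvShp n vis →
    (∀ p ∈ acc, pvInR n p ∧ pvGetB vis p.1 p.2 = true) →
    (pvShp n (ds.foldl (pvStep M T (n : Int) u) (vis, acc)).1 ∧
     (∀ p : Int × Int, pvInR n p → pvGetB vis p.1 p.2 = true →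
        pvGetB (ds.foldl (pvStep M T (n : Int) u) (vis, acc)).1 p.1 p.2 = true) ∧
     (∀ p : Int × Int, pvInR n p →
        pvGetB (ds.foldl (pvStep M T (n : Int) u) (vis, acc)).1 p.1 p.2 = true →
        pvGetB vis p.1 p.2 = true ∨ pvStp M T n u p) ∧
     (∀ d ∈ ds, pvInR n (u.1 + d.1, u.2 + d.2) → pvGetI M (u.1 + d.1) (u.2 + d.2) > T →
        pvGetB (ds.foldl (pvStep M T (n : Int) u) (vis, acc)).1 (u.1 + d.1) (u.2 + d.2) = true) ∧
     (∀ p ∈ (ds.foldl (pvStep M T (n : Int) u) (vis, acc)).2, pvInR n p ∧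
        pvGetB (ds.foldl (pvStep M T (n : Int) u) (vis, acc)).1 p.1 p.2 = true) ∧
     (∀ p : Int × Int, pvInR n p →
        pvGetB (ds.foldl (pvStep M T (n : Int) u) (vis, acc)).1 p.1 p.2 = true →
        pvGetB vis p.1 p.2 = true ∨ p ∈ (ds.foldl (pvStep M T (n : Int) u) (vis, acc)).2) ∧
     ((pvFls n (ds.foldl (pvStep M T (n : Int) u) (vis, acc)).1).card +
        (ds.foldl (pvStep M T (n : Int) u) (vis, acc)).2.length =
        (pvFls n vis).card + acc.length) ∧
     (∀ p ∈ acc, p ∈ (ds.foldl (pvStep M T (n : Int) u) (vis, acc)).2)) := by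
  intro ds
  induction ds with
  | nil =>
    intro _ vis acc hshp hacc
    simp only [List.foldl_nil]
    refine ⟨hshp, ?_, ?_, ?_, hacc, ?_, ?_, ?_⟩
    · exact fun p _ ht => ht
    · exact fun p _ ht => Or.inl ht
    · intro e he
      exact absurd he List.not_mem_nil
    · exact fun p _ ht => Or.inl ht
    · trivial
    · exact fun p hp => hp
  | cons d ds ih =>
    intro hds vis acc hshp hacc
    simp only [List.foldl_cons]
    have hdmem : d ∈ pvNeighbours := hds d List.mem_cons_self
    have hds' : ∀ e ∈ ds, e ∈ pvNeighbours := fun e he => hds e (List.mem_cons_of_mem _ he)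
    by_cases hg : 0 ≤ u.1 + d.1 ∧ u.1 + d.1 < (n : Int) ∧ 0 ≤ u.2 + d.2 ∧ u.2 + d.2 < (n : Int)
    · by_cases hc : pvGetB vis (u.1 + d.1) (u.2 + d.2) = false ∧
          pvGetI M (u.1 + d.1) (u.2 + d.2) > T
      · have he : pvStep M T (n : Int) u (vis, acc) d =
            (pvSet vis (u.1 + d.1) (u.2 + d.2), acc ++ [(u.1 + d.1, u.2 + d.2)]) := by
          unfold pvStep
          rw [if_neg (not_not_intro hg), if_pos hc]
        rw [he]
        obtain ⟨hg1, hg2, hg3, hg4⟩ := hg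
        have hinxy : pvInR n (u.1 + d.1, u.2 + d.2) := ⟨hg1, hg2, hg3, hg4⟩
        have hshp' : pvShp n (pvSet vis (u.1 + d.1) (u.2 + d.2)) := pvShp_set hshp _ hg1 hg2
        have hmono1 : ∀ p : Int × Int, pvInR n p → pvGetB vis p.1 p.2 = true →
            pvGetB (pvSet vis (u.1 + d.1) (u.2 + d.2)) p.1 p.2 = true := by
          intro p hp ht
          rw [pvGetB_set' hshp hg1 hg2 hg3 hg4 p.1 p.2 hp.1 hp.2.1 hp.2.2.1 hp.2.2.2, ht,
            Bool.or_true]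
        have hsetxy : pvGetB (pvSet vis (u.1 + d.1) (u.2 + d.2)) (u.1 + d.1) (u.2 + d.2)
            = true := by
          rw [pvGetB_set' hshp hg1 hg2 hg3 hg4 _ _ hg1 hg2 hg3 hg4]
          simp
        have hacc' : ∀ p ∈ acc ++ [(u.1 + d.1, u.2 + d.2)], pvInR n p ∧
            pvGetB (pvSet vis (u.1 + d.1) (u.2 + d.2)) p.1 p.2 = true := by
          intro p hp
          rcases List.mem_append.mp hp with hp | hp
          · obtain ⟨hi, ht⟩ := hacc p hp
            exact ⟨hi, hmono1 p hi ht⟩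
          · rw [List.mem_singleton] at hp
            subst hp
            exact ⟨hinxy, hsetxy⟩
        obtain ⟨c1, c2, c3, c4, c5, c6, c7, c8⟩ := ih hds'
          (pvSet vis (u.1 + d.1) (u.2 + d.2)) (acc ++ [(u.1 + d.1, u.2 + d.2)]) hshp' hacc'
        refine ⟨c1, ?_, ?_, ?_, c5, ?_, ?_, ?_⟩
        · intro p hp ht
          exact c2 p hp (hmono1 p hp ht)
        · intro p hp ht
          rcases c3 p hp ht with ht' | hstp
          · rw [pvGetB_set' hshp hg1 hg2 hg3 hg4 p.1 p.2 hp.1 hp.2.1 hp.2.2.1 hp.2.2.2] at ht'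
            rcases Bool.or_eq_true_iff.mp ht' with hx | hx
            · simp only [Bool.and_eq_true, decide_eq_true_eq] at hx
              obtain ⟨e1, e2⟩ := hx
              refine Or.inr ⟨hp, ?_, ⟨d, hdmem, ?_⟩⟩
              · rw [e1, e2]
                exact hc.2
              · exact Prod.ext_iff.mpr ⟨e1, e2⟩
            · exact Or.inl hx
          · exact Or.inr hstp
        · intro e he hin hopn
          rcases List.mem_cons.mp he with rfl | he'
          · exact c2 _ hin hsetxy
          · exact c4 e he' hin hopn
        · intro p hp ht
          rcases c6 p hp ht with ht' | hr
          · rw [pvGetB_set' hshp hg1 hg2 hg3 hg4 p.1 p.2 hp.1 hp.2.1 hp.2.2.1 hp.2.2.2] at ht'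
            rcases Bool.or_eq_true_iff.mp ht' with hx | hx
            · simp only [Bool.and_eq_true, decide_eq_true_eq] at hx
              refine Or.inr (c8 _ ?_)
              rw [List.mem_append, List.mem_singleton]
              exact Or.inr (Prod.ext_iff.mpr ⟨hx.1, hx.2⟩)
            · exact Or.inl hx
          · exact Or.inr hr
        · have hcard : (pvFls n (pvSet vis (u.1 + d.1) (u.2 + d.2))).card + 1
              = (pvFls n vis).card := pvFls_card_set hshp hinxy hc.1
          rw [c7, List.length_append, List.length_singleton]
          omega
        · intro p hp
          exact c8 p (List.mem_append.mpr (Or.inl hp))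
      · have he : pvStep M T (n : Int) u (vis, acc) d = (vis, acc) := by
          unfold pvStep
          rw [if_neg (not_not_intro hg), if_neg hc]
        rw [he]
        obtain ⟨c1, c2, c3, c4, c5, c6, c7, c8⟩ := ih hds' vis acc hshp hacc
        refine ⟨c1, c2, c3, ?_, c5, c6, c7, c8⟩
        intro e he' hin hopn
        rcases List.mem_cons.mp he' with rfl | he''
        · have ht : pvGetB vis (u.1 + e.1) (u.2 + e.2) = true := by
            rcases Bool.eq_false_or_eq_true (pvGetB vis (u.1 + e.1) (u.2 + e.2)) with hb | hb
            · exact hb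
            · exact absurd ⟨hb, hopn⟩ hc
          exact c2 _ hin ht
        · exact c4 e he'' hin hopn
    · have he : pvStep M T (n : Int) u (vis, acc) d = (vis, acc) := by
        unfold pvStep
        rw [if_pos hg]
      rw [he]
      obtain ⟨c1, c2, c3, c4, c5, c6, c7, c8⟩ := ih hds' vis acc hshp hacc
      refine ⟨c1, c2, c3, ?_, c5, c6, c7, c8⟩
      intro e he' hin hopn
      rcases List.mem_cons.mp he' with rfl | he''
      · exact absurd ⟨hin.1, hin.2.1, hin.2.2.1, hin.2.2.2⟩ hg
      · exact c4 e he'' hin hopn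

theorem pvClosed_reach {M : List (List Int)} {T : Int} {n : Nat} {vis : List (List Bool)}
    (hn : 0 < n) (h00 : pvGetB vis 0 0 = true)
    (hclosed : ∀ p : Int × Int, pvInR n p → pvGetB vis p.1 p.2 = true →
      ∀ q, pvStp M T n p q → pvGetB vis q.1 q.2 = true) :
    ∀ p : Int × Int, pvRch M T n p → pvGetB vis p.1 p.2 = true := by
  intro p hr
  induction hr with
  | refl => exact h00
  | @tail b c hab hbc ihb => exact hclosed b (pvRch_inR hn hab) ihb c hbc

-- A's BFS computes exactly the reachable set
theorem pvBfsA_loop (M : List (List Int)) (T : Int) (n : Nat) (hn : 0 < n) :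
    ∀ (fuel : Nat) (vis : List (List Bool)) (Q : List (Int × Int)),
    pvShp n vis → pvGetB vis 0 0 = true →
    (∀ p ∈ Q, pvInR n p ∧ pvGetB vis p.1 p.2 = true) →
    (∀ p : Int × Int, pvInR n p → pvGetB vis p.1 p.2 = true → pvRch M T n p) →
    (∀ p : Int × Int, pvInR n p → pvGetB vis p.1 p.2 = true →
        p ∈ Q ∨ ∀ q, pvStp M T n p q → pvGetB vis q.1 q.2 = true) →
    (pvFls n vis).card + Q.length ≤ fuel →
    ∀ p : Int × Int, pvInR n p →
      (pvGetB (pvBfs M T (n : Int) fuel vis Q) p.1 p.2 = true ↔ pvRch M T n p) := by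
  have hin00 : pvInR n ((0, 0) : Int × Int) := by
    refine ⟨le_refl 0, ?_, le_refl 0, ?_⟩ <;> · show (0:Int) < (n:Int); exact_mod_cast hn
  intro fuel
  induction fuel with
  | zero =>
    intro vis Q hshp h00 hQ hreach hfront hcard p hp
    cases Q with
    | nil =>
      rw [show pvBfs M T (n : Int) 0 vis [] = vis from rfl]
      constructor
      · exact hreach p hp
      · intro hr
        refine pvClosed_reach hn h00 ?_ p hr
        intro p' hp' ht' q hq
        rcases hfront p' hp' ht' with hmem | hcl
        · exact absurd hmem List.not_mem_nil
        · exact hcl q hq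
    | cons u Qt =>
      exfalso
      simp only [List.length_cons] at hcard
      omega
  | succ fuel ih =>
    intro vis Q hshp h00 hQ hreach hfront hcard p hp
    cases Q with
    | nil =>
      rw [show pvBfs M T (n : Int) (fuel + 1) vis [] = vis from rfl]
      constructor
      · exact hreach p hp
      · intro hr
        refine pvClosed_reach hn h00 ?_ p hr
        intro p' hp' ht' q hq
        rcases hfront p' hp' ht' with hmem | hcl
        · exact absurd hmem List.not_mem_nil
        · exact hcl q hq
    | cons u Qt =>
      obtain ⟨hu_in, hu_mem⟩ := hQ u List.mem_cons_self
      have hu_rch : pvRch M T n u := hreach u hu_in hu_mem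
      obtain ⟨c1, c2, c3, c4, c5, c6, c7, c8⟩ :=
        pvFold_step M T n u pvNeighbours (fun d hd => hd) vis [] hshp (by simp)
      rw [show pvBfs M T (n : Int) (fuel + 1) vis (u :: Qt) =
        pvBfs M T (n : Int) fuel
          (pvNeighbours.foldl (pvStep M T (n : Int) u) (vis, [])).1
          (Qt ++ (pvNeighbours.foldl (pvStep M T (n : Int) u) (vis, [])).2) from rfl]
      refine ih _ _ c1 (c2 (0, 0) hin00 h00) ?_ ?_ ?_ ?_ p hp
      · intro q hq
        rcases List.mem_append.mp hq with hq | hq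
        · obtain ⟨hqi, hqm⟩ := hQ q (List.mem_cons_of_mem _ hq)
          exact ⟨hqi, c2 q hqi hqm⟩
        · exact c5 q hq
      · intro q hq ht
        rcases c3 q hq ht with hv | hstp
        · exact hreach q hq hv
        · exact Relation.ReflTransGen.tail hu_rch hstp
      · intro q hq ht
        rcases c6 q hq ht with hv | hin2
        · rcases hfront q hq hv with hmemQ | hcl
          · rcases List.mem_cons.mp hmemQ with rfl | hqt
            · refine Or.inr ?_
              intro w hw
              obtain ⟨hwIn, hwOpn, d, hd, rfl⟩ := hw
              exact c4 d hd hwIn hwOpn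
            · exact Or.inl (List.mem_append.mpr (Or.inl hqt))
          · refine Or.inr ?_
            intro w hw
            exact c2 w hw.1 (hcl w hw)
        · exact Or.inl (List.mem_append.mpr (Or.inr hin2))
      · simp only [List.length_append]
        simp only [List.length_cons] at hcard
        simp only [List.length_nil, Nat.add_zero] at c7
        omega

theorem pvShp_expand (M : List (List Int)) (T : Int) (n : Nat) (vis : List (List Bool)) :
    pvShp n (pvExpand M T n vis) := by
  constructor
  · simp [pvExpand]
  · intro row hrow
    simp only [pvExpand, List.mem_map, List.mem_range] at hrow
    obtain ⟨i, -, rfl⟩ := hrow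
    simp

theorem pvGetB_expand (M : List (List Int)) (T : Int) (n : Nat) (vis : List (List Bool))
    {p : Int × Int} (hp : pvInR n p) :
    pvGetB (pvExpand M T n vis) p.1 p.2 =
      (pvGetB vis p.1 p.2 ||
        (decide (pvGetI M p.1 p.2 > T) &&
          pvNeighbours.any (fun d =>
            decide (0 ≤ p.1 + d.1 ∧ p.1 + d.1 < (n : Int) ∧
                    0 ≤ p.2 + d.2 ∧ p.2 + d.2 < (n : Int)) &&
            pvGetB vis (p.1 + d.1) (p.2 + d.2)))) := by
  obtain ⟨h1, h2, h3, h4⟩ := hp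
  conv_lhs => rw [pvGetB, pvExpand]
  simp only [List.getD_eq_getElem?_getD]
  rw [List.getElem?_map, List.getElem?_range (show p.1.toNat < n by omega)]
  simp only [Option.map_some, Option.getD_some]
  rw [List.getElem?_map, List.getElem?_range (show p.2.toNat < n by omega)]
  simp only [Option.map_some, Option.getD_some]
  rw [Int.toNat_of_nonneg h1, Int.toNat_of_nonneg h3]

theorem pvGrid_ext {n : Nat} {a b : List (List Bool)} (ha : pvShp n a) (hb : pvShp n b)
    (h : ∀ i j : Nat, i < n → j < n → pvGetB a (i : Int) (j : Int) = pvGetB b (i : Int) (j : Int)) :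
    a = b := by
  apply List.ext_getElem?
  intro i
  by_cases hi : i < n
  · have hia : i < a.length := by rw [ha.1]; exact hi
    have hib : i < b.length := by rw [hb.1]; exact hi
    rw [List.getElem?_eq_getElem hia, List.getElem?_eq_getElem hib]
    have hrla : (a[i]'hia).length = n := ha.2 _ (List.getElem_mem hia)
    have hrlb : (b[i]'hib).length = n := hb.2 _ (List.getElem_mem hib)
    congr 1
    apply List.ext_getElem?
    intro j
    by_cases hj : j < n
    · have e := h i j hi hj
      unfold pvGetB at e
      simp only [List.getD_eq_getElem?_getD, Int.toNat_natCast] at e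
      rw [List.getElem?_eq_getElem hia, List.getElem?_eq_getElem hib] at e
      simp only [Option.getD_some] at e
      rw [List.getElem?_eq_getElem (show j < (a[i]'hia).length by omega),
        List.getElem?_eq_getElem (show j < (b[i]'hib).length by omega)] at e ⊢
      simp only [Option.getD_some] at e
      rw [e]
    · rw [List.getElem?_eq_none (by omega), List.getElem?_eq_none (by omega)]
  · rw [List.getElem?_eq_none (by rw [ha.1]; omega), List.getElem?_eq_none (by rw [hb.1]; omega)]

-- B's sweep loop computes exactly the reachable set
theorem pvSweepB_loop (M : List (List Int)) (T : Int) (n : Nat) (hn : 0 < n) :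
    ∀ (k : Nat) (vis : List (List Bool)),
    pvShp n vis → pvGetB vis 0 0 = true →
    (∀ p : Int × Int, pvInR n p → pvGetB vis p.1 p.2 = true → pvRch M T n p) →
    (pvFls n vis).card ≤ k →
    ∀ p : Int × Int, pvInR n p →
      (pvGetB (pvSweep M T n k vis) p.1 p.2 = true ↔ pvRch M T n p) := by
  have hin00 : pvInR n ((0, 0) : Int × Int) := by
    refine ⟨le_refl 0, ?_, le_refl 0, ?_⟩ <;> · show (0:Int) < (n:Int); exact_mod_cast hn
  intro k
  induction k with
  | zero =>
    intro vis hshp h00 hreach hcard p hp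
    rw [show pvSweep M T n 0 vis = vis from rfl]
    constructor
    · exact hreach p hp
    · intro _
      have hcard0 : (pvFls n vis).card = 0 := Nat.le_zero.mp hcard
      have hempty := Finset.card_eq_zero.mp hcard0
      rcases Bool.eq_false_or_eq_true (pvGetB vis p.1 p.2) with ht | hf
      · exact ht
      · exfalso
        obtain ⟨hp1, hp2, hp3, hp4⟩ := hp
        have hmem : ((⟨p.1.toNat, by omega⟩, ⟨p.2.toNat, by omega⟩) : Fin n × Fin n)
            ∈ pvFls n vis := by
          simp only [pvFls, Finset.mem_filter, Finset.mem_univ, true_and]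
          rw [show (((p.1.toNat : Nat)) : Int) = p.1 by omega,
            show (((p.2.toNat : Nat)) : Int) = p.2 by omega]
          exact hf
        rw [hempty] at hmem
        exact absurd hmem (by simp)
  | succ k ih =>
    intro vis hshp h00 hreach hcard p hp
    by_cases hfix : pvExpand M T n vis = vis
    · rw [show pvSweep M T n (k + 1) vis =
        (if pvExpand M T n vis = vis then vis else pvSweep M T n k (pvExpand M T n vis))
        from rfl, if_pos hfix]
      constructor
      · exact hreach p hp
      · intro hr
        refine pvClosed_reach hn h00 ?_ p hr
        intro a ha hta q hq
        obtain ⟨hqIn, hqOpn, d, hd, rfl⟩ := hq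
        have e : pvGetB (pvExpand M T n vis) (a.1 + d.1) (a.2 + d.2)
            = pvGetB vis (a.1 + d.1) (a.2 + d.2) := by rw [hfix]
        rw [show ((a.1 + d.1, a.2 + d.2) : Int × Int).1 = a.1 + d.1 from rfl,
          show ((a.1 + d.1, a.2 + d.2) : Int × Int).2 = a.2 + d.2 from rfl]
        rw [← e, pvGetB_expand M T n vis hqIn]
        refine Bool.or_eq_true_iff.mpr (Or.inr ?_)
        rw [Bool.and_eq_true]
        refine ⟨decide_eq_true hqOpn, ?_⟩
        rw [List.any_eq_true]
        refine ⟨(-d.1, -d.2), pvNeighbours_neg hd, ?_⟩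
        rw [Bool.and_eq_true]
        have e1 : ((a.1 + d.1, a.2 + d.2) : Int × Int).1 + -d.1 = a.1 := by
          show a.1 + d.1 + -d.1 = a.1; ring
        have e2 : ((a.1 + d.1, a.2 + d.2) : Int × Int).2 + -d.2 = a.2 := by
          show a.2 + d.2 + -d.2 = a.2; ring
        constructor
        · apply decide_eq_true
          rw [e1, e2]
          exact ⟨ha.1, ha.2.1, ha.2.2.1, ha.2.2.2⟩
        · rw [e1, e2]
          exact hta
    · rw [show pvSweep M T n (k + 1) vis =
        (if pvExpand M T n vis = vis then vis else pvSweep M T n k (pvExpand M T n vis))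
        from rfl, if_neg hfix]
      have hext : ∀ q : Int × Int, pvInR n q → pvGetB vis q.1 q.2 = true →
          pvGetB (pvExpand M T n vis) q.1 q.2 = true := by
        intro q hq ht
        rw [pvGetB_expand M T n vis hq, ht, Bool.true_or]
      have h00' : pvGetB (pvExpand M T n vis) 0 0 = true := hext (0, 0) hin00 h00
      have hreach' : ∀ q : Int × Int, pvInR n q →
          pvGetB (pvExpand M T n vis) q.1 q.2 = true → pvRch M T n q := by
        intro q hq ht
        rw [pvGetB_expand M T n vis hq] at ht
        rcases Bool.or_eq_true_iff.mp ht with hv | hx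
        · exact hreach q hq hv
        · rw [Bool.and_eq_true, List.any_eq_true] at hx
          obtain ⟨hopn, d, hd, hdx⟩ := hx
          rw [Bool.and_eq_true, decide_eq_true_eq] at hdx
          obtain ⟨hdin, hdmem⟩ := hdx
          have hrd : pvRch M T n (q.1 + d.1, q.2 + d.2) := hreach _ hdin hdmem
          refine Relation.ReflTransGen.tail hrd ⟨hq, by exact_mod_cast (decide_eq_true_eq.mp hopn), ?_⟩
          refine ⟨(-d.1, -d.2), pvNeighbours_neg hd, ?_⟩
          refine Prod.ext_iff.mpr ⟨?_, ?_⟩ <;> · show _ = _ + _; ring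
      have hsub : pvFls n (pvExpand M T n vis) ⊆ pvFls n vis := by
        intro q hq
        simp only [pvFls, Finset.mem_filter, Finset.mem_univ, true_and] at hq ⊢
        have hqin : pvInR n (((q.1.val : Nat) : Int), ((q.2.val : Nat) : Int)) :=
          ⟨Int.natCast_nonneg _,
            by show ((q.1.val : Nat) : Int) < (n : Int); exact_mod_cast q.1.isLt,
            Int.natCast_nonneg _,
            by show ((q.2.val : Nat) : Int) < (n : Int); exact_mod_cast q.2.isLt⟩
        rcases Bool.eq_false_or_eq_true (pvGetB vis ((q.1.val : Nat) : Int) ((q.2.val : Nat) : Int)) with ht | hf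
        · rw [hext _ hqin ht] at hq
          exact absurd hq (by simp)
        · exact hf
      have hne : pvFls n (pvExpand M T n vis) ≠ pvFls n vis := by
        intro heq
        apply hfix
        apply pvGrid_ext (pvShp_expand M T n vis) hshp
        intro i j hi hj
        have hqin : pvInR n (((i : Nat) : Int), ((j : Nat) : Int)) :=
          ⟨Int.natCast_nonneg _, by show ((i : Nat) : Int) < (n : Int); exact_mod_cast hi,
            Int.natCast_nonneg _, by show ((j : Nat) : Int) < (n : Int); exact_mod_cast hj⟩
        rcases Bool.eq_false_or_eq_true (pvGetB vis (i : Int) (j : Int)) with ht | hf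
        · rw [ht, hext _ hqin ht]
        · have hmem : ((⟨i, hi⟩, ⟨j, hj⟩) : Fin n × Fin n) ∈ pvFls n vis := by
            simp only [pvFls, Finset.mem_filter, Finset.mem_univ, true_and]
            exact hf
          rw [← heq] at hmem
          simp only [pvFls, Finset.mem_filter, Finset.mem_univ, true_and] at hmem
          rw [hmem, hf]
      have hcard' : (pvFls n (pvExpand M T n vis)).card ≤ k := by
        have := Finset.card_lt_card (ssubset_of_subset_of_ne hsub hne)
        omega
      exact ih (pvExpand M T n vis) (pvShp_expand M T n vis) h00' hreach' hcard' p hp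

-- facts about the common initial grid
theorem pvGetB_rep (n : Nat) (i j : Int) :
    pvGetB (List.replicate n (List.replicate n false)) i j = false := by
  unfold pvGetB
  simp only [List.getD_eq_getElem?_getD]
  rw [List.getElem?_replicate]
  by_cases hi : i.toNat < n
  · rw [if_pos hi, Option.getD_some, List.getElem?_replicate]
    by_cases hj : j.toNat < n
    · rw [if_pos hj, Option.getD_some]
    · rw [if_neg hj, Option.getD_none]
  · rw [if_neg hi, Option.getD_none]
    simp

theorem to_port_eq (M : List (List Int)) (T : Int) (hne : M ≠ []) :
    to_port M T = to_port_alt M T := by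
  have hn : 0 < M.length := List.length_pos_of_ne_nil hne
  have hin00 : pvInR M.length ((0, 0) : Int × Int) := by
    refine ⟨le_refl 0, ?_, le_refl 0, ?_⟩ <;>
      · show (0:Int) < (M.length:Int); exact_mod_cast hn
  have hshp0 : pvShp M.length (List.replicate M.length (List.replicate M.length false)) := by
    refine ⟨List.length_replicate, ?_⟩
    intro row hrow
    rw [List.eq_of_mem_replicate hrow]
    exact List.length_replicate
  have h0lt : (0:Int) < (M.length : Int) := by exact_mod_cast hn
  have hshp1 : pvShp M.length
      (pvSet (List.replicate M.length (List.replicate M.length false)) 0 0) :=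
    pvShp_set hshp0 0 (le_refl 0) h0lt
  have h001 : pvGetB (pvSet (List.replicate M.length (List.replicate M.length false)) 0 0)
      0 0 = true := by
    rw [pvGetB_set' hshp0 (le_refl 0) h0lt (le_refl 0) h0lt 0 0 (le_refl 0) h0lt (le_refl 0)
      h0lt]
    simp
  have hmem1 : ∀ p : Int × Int, pvInR M.length p →
      pvGetB (pvSet (List.replicate M.length (List.replicate M.length false)) 0 0)
        p.1 p.2 = true → p = ((0, 0) : Int × Int) := by
    intro p hp ht
    rw [pvGetB_set' hshp0 (le_refl 0) h0lt (le_refl 0) h0lt p.1 p.2 hp.1 hp.2.1 hp.2.2.1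
      hp.2.2.2, pvGetB_rep, Bool.or_false, Bool.and_eq_true, decide_eq_true_eq,
      decide_eq_true_eq] at ht
    exact Prod.ext_iff.mpr ⟨ht.1, ht.2⟩
  have hreach1 : ∀ p : Int × Int, pvInR M.length p →
      pvGetB (pvSet (List.replicate M.length (List.replicate M.length false)) 0 0)
        p.1 p.2 = true → pvRch M T M.length p := by
    intro p hp ht
    rw [hmem1 p hp ht]
    exact Relation.ReflTransGen.refl
  have hQ1 : ∀ p ∈ [((0, 0) : Int × Int)], pvInR M.length p ∧
      pvGetB (pvSet (List.replicate M.length (List.replicate M.length false)) 0 0)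
        p.1 p.2 = true := by
    intro p hp
    rw [List.mem_singleton] at hp
    subst hp
    exact ⟨hin00, h001⟩
  have hfront1 : ∀ p : Int × Int, pvInR M.length p →
      pvGetB (pvSet (List.replicate M.length (List.replicate M.length false)) 0 0)
        p.1 p.2 = true → p ∈ [((0, 0) : Int × Int)] ∨
        ∀ q, pvStp M T M.length p q →
          pvGetB (pvSet (List.replicate M.length (List.replicate M.length false)) 0 0)
            q.1 q.2 = true := by
    intro p hp ht
    left
    rw [List.mem_singleton]
    exact hmem1 p hp ht
  have hcard0 : (pvFls M.length (List.replicate M.length (List.replicate M.length false))).card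
      = M.length * M.length := by
    have he : pvFls M.length (List.replicate M.length (List.replicate M.length false))
        = Finset.univ := by
      ext q
      simp [pvFls, pvGetB_rep]
    rw [he, Finset.card_univ, Fintype.card_prod, Fintype.card_fin]
  have hcard1 : (pvFls M.length
      (pvSet (List.replicate M.length (List.replicate M.length false)) 0 0)).card + 1
      = M.length * M.length := by
    rw [← hcard0]
    exact pvFls_card_set hshp0 hin00 (pvGetB_rep _ _ _)
  have hpc : pvInR M.length (((M.length : Int) - 1, (M.length : Int) - 1) : Int × Int) := by
    refine ⟨?_, ?_, ?_, ?_⟩ <;> · show _; simp only []; omega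
  have hA := pvBfsA_loop M T M.length hn (M.length * M.length)
    (pvSet (List.replicate M.length (List.replicate M.length false)) 0 0)
    [((0, 0) : Int × Int)] hshp1 h001 hQ1 hreach1 hfront1
    (by simp only [List.length_singleton]; omega)
    (((M.length : Int) - 1, (M.length : Int) - 1)) hpc
  have hB := pvSweepB_loop M T M.length hn (M.length * M.length)
    (pvSet (List.replicate M.length (List.replicate M.length false)) 0 0)
    hshp1 h001 hreach1 (by omega)
    (((M.length : Int) - 1, (M.length : Int) - 1)) hpc
  show pvGetB (pvBfs M T (M.length : Int) (M.length * M.length)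
      (pvSet (List.replicate M.length (List.replicate M.length false)) 0 0)
      [((0, 0) : Int × Int)]) ((M.length : Int) - 1) ((M.length : Int) - 1)
    = pvGetB (pvSweep M T M.length (M.length * M.length)
      (pvSet (List.replicate M.length (List.replicate M.length false)) 0 0))
      ((M.length : Int) - 1) ((M.length : Int) - 1)
  rw [Bool.eq_iff_iff]
  constructor
  · intro h
    exact hB.mpr (hA.mp h)
  · intro h
    exact hA.mpr (hB.mp h)

-- ===== VERDICT (by name: the statement is the Claim_ definition above) =====
theorem to_port_spec : Claim_equal_to_port := by
  intro M T _ hpre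
  exact to_port_eq M T hpre.1
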